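-- pv_equiv track=rewrite | github.com/hello0matter/passhack | passhack.py | identify_login_fields_from_summary
-- ===== SOURCE A (Python) =====
-- USER_FIELD_KEYWORDS = [
--     "user",
--     "username",
--     "userid",
--     "login",
--     "loginname",
--     "account",
--     "name",
--     "email",
--     "mail",
--     "phone",
--     "mobile",
--     "tel",
--     "member",
--     "uid",
--     "账号",
--     "账户",
--     "用户名",
--     "登录名",
--     "手机号",
--     "手机",
--     "邮箱",
--     "工号",
--     "学号",
-- ]
--
-- PASSWORD_FIELD_KEYWORDS = ["password", "passwd", "pass", "pwd", "口令", "密码"]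
--
-- def identify_login_fields_from_summary(field_summary):
--     user_key = ""
--     pass_key = ""
--     for field in (field_summary or "").split(" | "):
--         if ":" not in field:
--             continue
--         field_type, field_name = field.split(":", 1)
--         field_name = field_name.strip()
--         lower_name = field_name.lower()
--         if not user_key and any(keyword in lower_name for keyword in USER_FIELD_KEYWORDS):
--             user_key = field_name
--         if not pass_key and (
--             "password" in field_type.lower()
--             or any(keyword in lower_name for keyword in PASSWORD_FIELD_KEYWORDS)
--         ):
--             pass_key = field_name
--     return user_key, pass_key
-- ===== SOURCE B (Python) =====
-- USER_FIELD_KEYWORDS = [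
--     "user", "username", "userid", "login", "loginname", "account", "name",
--     "email", "mail", "phone", "mobile", "tel", "member", "uid",
--     "账号", "账户", "用户名", "登录名", "手机号", "手机", "邮箱", "工号", "学号",
-- ]
--
-- PASSWORD_FIELD_KEYWORDS = ["password", "passwd", "pass", "pwd", "口令", "密码"]
--
--
-- def identify_login_fields_from_summary(field_summary):
--     # Parse once into (type, stripped name) pairs, then two independent
--     # first-match searches.  A match with an empty stripped name leaves A's
--     # accumulator falsy, so requiring a non-empty name reproduces A exactly.
--     pairs = []
--     for field in (field_summary or "").split(" | "):
--         if ":" in field: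
--             ftype, name = field.split(":", 1)
--             pairs.append((ftype, name.strip()))
--     user_key = next(
--         (n for _, n in pairs
--          if n and any(k in n.lower() for k in USER_FIELD_KEYWORDS)), "")
--     pass_key = next(
--         (n for t, n in pairs
--          if n and ("password" in t.lower()
--                    or any(k in n.lower() for k in PASSWORD_FIELD_KEYWORDS))), "")
--     return user_key, pass_key
-- ===== Notes on version B (the rewrite author's own statement) =====
-- stated objective: alternative
-- what changed: A's single loop threading two string accumulators (each frozen once non-empty) is replaced by a parse phase producing (type, stripped name) pairs followed by two independent first-match searches whose predicates require a non-empty name.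
import Mathlib
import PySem

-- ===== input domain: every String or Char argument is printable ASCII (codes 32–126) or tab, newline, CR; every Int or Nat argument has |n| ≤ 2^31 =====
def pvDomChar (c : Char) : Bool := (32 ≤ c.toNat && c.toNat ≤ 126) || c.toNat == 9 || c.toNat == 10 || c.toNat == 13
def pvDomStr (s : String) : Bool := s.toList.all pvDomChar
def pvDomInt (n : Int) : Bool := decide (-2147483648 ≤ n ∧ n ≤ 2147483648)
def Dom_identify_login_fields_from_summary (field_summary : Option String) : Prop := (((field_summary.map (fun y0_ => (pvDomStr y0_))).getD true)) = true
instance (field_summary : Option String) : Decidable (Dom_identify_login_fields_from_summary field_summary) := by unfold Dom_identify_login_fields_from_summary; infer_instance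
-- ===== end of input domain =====

-- B re-decomposes A's single two-accumulator loop into a parse pass plus two independent
-- first-match searches (objective: alternative decomposition; same asymptotic cost).


def pvUserKW : List String :=
  ["user", "username", "userid", "login", "loginname", "account", "name",
   "email", "mail", "phone", "mobile", "tel", "member", "uid",
   "账号", "账户", "用户名", "登录名", "手机号", "手机", "邮箱", "工号", "学号"]

def pvPassKW : List String := ["password", "passwd", "pass", "pwd", "口令", "密码"]

-- ===== PORT A =====
-- A's loop body on one field (the `for` body, acting on the (user_key, pass_key) state)
def pvStepA (acc : String × String) (field : String) : String × String :=
  if PySem.Str.isIn ":" field = false then acc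
  else
    match (PySem.Str.splitMax? field ":" 1).getD [] with
    | [field_type, fn0] =>
      let field_name := PySem.Str.strip fn0
      let lower_name := PySem.Str.lower field_name
      let user_key :=
        if acc.1 = "" ∧ pvUserKW.any (fun k => PySem.Str.isIn k lower_name) = true
        then field_name else acc.1
      let pass_key :=
        if acc.2 = "" ∧ (PySem.Str.isIn "password" (PySem.Str.lower field_type) = true
                          ∨ pvPassKW.any (fun k => PySem.Str.isIn k lower_name) = true)
        then field_name else acc.2
      (user_key, pass_key)
    | _ => acc  -- unreachable: with ":" in field, split(":", 1) yields two parts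

def identify_login_fields_from_summary (field_summary : Option String) : String × String :=
  (((PySem.Str.split? (field_summary.getD "") " | ").getD []).foldl pvStepA ("", ""))

-- ===== PORT B =====
-- parse one field: the (field_type, stripped field_name) pair, or none if it has no ':'
def pvParseField (field : String) : Option (String × String) :=
  if PySem.Str.isIn ":" field then
    match (PySem.Str.splitMax? field ":" 1).getD [] with
    | [t, n] => some (t, PySem.Str.strip n)
    | _ => none
  else none

def pvUserHit (n : String) : Bool :=
  (n != "") && pvUserKW.any (fun k => PySem.Str.isIn k (PySem.Str.lower n))

def pvPassHit (t n : String) : Bool :=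
  (n != "") && (PySem.Str.isIn "password" (PySem.Str.lower t)
                || pvPassKW.any (fun k => PySem.Str.isIn k (PySem.Str.lower n)))

def identify_login_fields_from_summary_alt (field_summary : Option String) : String × String :=
  let pairs := (((PySem.Str.split? (field_summary.getD "") " | ").getD []).filterMap pvParseField)
  ( (((pairs.find? (fun q => pvUserHit q.2)).map Prod.snd).getD ""),
    (((pairs.find? (fun q => pvPassHit q.1 q.2)).map Prod.snd).getD "") )

-- ===== PRECONDITION & SPEC =====
def Spec_identify_login_fields_from_summary (field_summary : Option String) (out : String × String) : Prop := out = identify_login_fields_from_summary_alt field_summary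
instance (field_summary : Option String) (out : String × String) : Decidable (Spec_identify_login_fields_from_summary field_summary out) := by unfold Spec_identify_login_fields_from_summary; infer_instance

-- ===== CLAIM (what is proved, stated in full; the proofs are below) =====
def Claim_equal_identify_login_fields_from_summary : Prop := ∀ (field_summary : Option String), Dom_identify_login_fields_from_summary field_summary → Spec_identify_login_fields_from_summary field_summary (identify_login_fields_from_summary field_summary)

-- ===== LEMMAS AND PROOFS =====
-- B's answer on a field list, componentwise
def pvFindU (fields : List String) : String :=
  ((((fields.filterMap pvParseField).find? (fun q => pvUserHit q.2)).map Prod.snd).getD "")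
def pvFindP (fields : List String) : String :=
  ((((fields.filterMap pvParseField).find? (fun q => pvPassHit q.1 q.2)).map Prod.snd).getD "")

-- pvStepA read through the parse result
theorem pvStepA_none {f : String} (h : pvParseField f = none) (acc : String × String) :
    pvStepA acc f = acc := by
  unfold pvParseField at h
  unfold pvStepA
  cases hc : PySem.Str.isIn ":" f
  · simp
  · rw [hc] at h
    simp only [if_pos rfl] at h
    rcases hsp : (PySem.Str.splitMax? f ":" 1).getD [] with _ | ⟨t, _ | ⟨n0, _ | _⟩⟩ <;>
      rw [hsp] at h <;> simp [hsp, Bool.true_eq_false] <;> simp at h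

theorem pvStepA_some {f t n : String} (h : pvParseField f = some (t, n)) (acc : String × String) :
    pvStepA acc f =
      (if acc.1 = "" ∧ pvUserKW.any (fun k => PySem.Str.isIn k (PySem.Str.lower n)) = true
       then n else acc.1,
       if acc.2 = "" ∧ (PySem.Str.isIn "password" (PySem.Str.lower t) = true
            ∨ pvPassKW.any (fun k => PySem.Str.isIn k (PySem.Str.lower n)) = true)
       then n else acc.2) := by
  unfold pvParseField at h
  unfold pvStepA
  cases hc : PySem.Str.isIn ":" f
  · rw [hc] at h; simp at h
  · rw [hc] at h
    simp only [if_pos rfl] at h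
    rcases hsp : (PySem.Str.splitMax? f ":" 1).getD [] with _ | ⟨t', _ | ⟨n0, _ | _⟩⟩ <;>
      rw [hsp] at h
    · simp at h
    · simp at h
    · simp at h
      obtain ⟨ht, hn⟩ := h
      subst ht; subst hn
      simp [Bool.true_eq_false]
    · simp at h

theorem pvFindU_cons_none {f : String} (h : pvParseField f = none) (rest : List String) :
    pvFindU (f :: rest) = pvFindU rest := by
  simp [pvFindU, List.filterMap_cons, h]

theorem pvFindP_cons_none {f : String} (h : pvParseField f = none) (rest : List String) :
    pvFindP (f :: rest) = pvFindP rest := by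
  simp [pvFindP, List.filterMap_cons, h]

theorem pvFindU_cons_some {f : String} {q : String × String} (h : pvParseField f = some q)
    (rest : List String) :
    pvFindU (f :: rest) = if pvUserHit q.2 then q.2 else pvFindU rest := by
  by_cases hq : pvUserHit q.2 = true <;>
    simp [pvFindU, List.filterMap_cons, h, List.find?_cons, hq]

theorem pvFindP_cons_some {f : String} {q : String × String} (h : pvParseField f = some q)
    (rest : List String) :
    pvFindP (f :: rest) = if pvPassHit q.1 q.2 then q.2 else pvFindP rest := by
  by_cases hq : pvPassHit q.1 q.2 = true <;>
    simp [pvFindP, List.filterMap_cons, h, List.find?_cons, hq]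

-- loop invariant: A's foldl from any state (u, p) — a non-empty accumulator is frozen,
-- an empty one ends up at B's first match with a non-empty stripped name
theorem pvLoopA_eq (fields : List String) : ∀ (u p : String),
    fields.foldl pvStepA (u, p)
      = (if u = "" then pvFindU fields else u, if p = "" then pvFindP fields else p) := by
  induction fields with
  | nil => intro u p; simp [pvFindU, pvFindP]
  | cons f rest ih =>
    intro u p
    simp only [List.foldl_cons]
    cases hq : pvParseField f with
    | none =>
      rw [pvStepA_none hq, ih, pvFindU_cons_none hq, pvFindP_cons_none hq]
    | some q =>
      obtain ⟨t, n⟩ := q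
      rw [pvStepA_some hq, ih, pvFindU_cons_some hq, pvFindP_cons_some hq]
      simp only [Prod.mk.injEq]
      constructor
      · by_cases hu : u = "" <;> by_cases hn : n = "" <;>
          by_cases hA : pvUserKW.any (fun k => PySem.Str.isIn k (PySem.Str.lower n)) = true <;>
          simp_all [pvUserHit]
      · by_cases hp : p = "" <;> by_cases hn : n = "" <;>
          by_cases hB : (PySem.Str.isIn "password" (PySem.Str.lower t) = true
              ∨ pvPassKW.any (fun k => PySem.Str.isIn k (PySem.Str.lower n)) = true) <;>
          simp_all [pvPassHit]
-- ===== VERDICT (by name: the statement is the Claim_ definition above) =====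
theorem identify_login_fields_from_summary_spec : Claim_equal_identify_login_fields_from_summary := by
  intro fs _
  show _ = _
  unfold identify_login_fields_from_summary identify_login_fields_from_summary_alt
  rw [pvLoopA_eq]
  rfl
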